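-- pv_equiv track=rewrite | github.com/LouBdt/twitter-post-parser | postparserforthreads.py | extraireDate
-- ===== SOURCE A (Python) =====
-- def extraireDate(string):
--     start_date = False
--     date = ""
--     annee = ""
--     compte_espace = 0
--     for char in string:
--         if char==" " and start_date:
--             compte_espace+=1
--         if char==']':
--             break
--         if start_date and compte_espace>0 and compte_espace<3:
--             date += char
--         if start_date and compte_espace>4:
--             annee += char
--         if char=='[' or compte_espace== 5:
--             start_date = True
--     return annee+" "+date
-- ===== SOURCE B (Python) =====
-- def extraireDate(string):
--     if '[' not in string:
--         return ' '
--     start = string.index('[')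
--     end = string.index(']') if ']' in string else len(string)
--     if end < start:
--         return ' '
--     content = string[start + 1:end]
--     # positions of spaces, padded with len(content) sentinels so the
--     # 1st/3rd/5th space positions default to the end of content
--     spaces = [i for i, c in enumerate(content) if c == ' '] + [len(content)] * 5
--     date = content[spaces[0]:spaces[2]]
--     annee = content[spaces[4]:]
--     return annee + ' ' + date
-- ===== Notes on version B (the rewrite author's own statement) =====
-- stated objective: simpler
-- what changed: A's single-pass state machine (start_date flag plus a space counter deciding char-by-char what goes into date/annee) is replaced by locating the brackets, slicing out the bracketed content, computing the list of space positions once, and taking two slices of the content at the 1st/3rd and 5th space positions.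
import Mathlib
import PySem

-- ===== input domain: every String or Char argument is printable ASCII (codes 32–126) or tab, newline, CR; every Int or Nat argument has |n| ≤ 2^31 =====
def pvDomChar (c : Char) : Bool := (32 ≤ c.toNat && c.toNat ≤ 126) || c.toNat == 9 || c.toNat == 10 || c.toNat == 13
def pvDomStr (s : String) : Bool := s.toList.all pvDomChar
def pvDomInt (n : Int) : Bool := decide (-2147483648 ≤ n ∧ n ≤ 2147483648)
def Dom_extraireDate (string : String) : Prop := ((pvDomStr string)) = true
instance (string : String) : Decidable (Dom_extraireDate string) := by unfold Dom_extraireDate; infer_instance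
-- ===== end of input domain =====

-- B replaces A's one-pass boolean/counter state machine by locating '[' / ']' and the
-- space positions and slicing the bracketed content (objective: simpler, same cost).

-- ===== PORT A =====
-- literal port of A's for-loop: state (start_date, date, annee, compte_espace), break at ']'
def extraireDateLoop : List Char → Bool → List Char → List Char → Nat → List Char × List Char
  | [], _, date, annee, _ => (date, annee)
  | ch :: rest, sd, date, annee, cs =>
    let cs1 := if ch = ' ' ∧ sd then cs + 1 else cs
    if ch = ']' then (date, annee)
    else
      let date1 := if sd ∧ 0 < cs1 ∧ cs1 < 3 then date ++ [ch] else date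
      let annee1 := if sd ∧ 4 < cs1 then annee ++ [ch] else annee
      let sd1 := if ch = '[' ∨ cs1 = 5 then true else sd
      extraireDateLoop rest sd1 date1 annee1 cs1

def extraireDate (string : String) : String :=
  let r := extraireDateLoop string.toList false [] [] 0
  String.ofList (r.2 ++ ' ' :: r.1)

-- ===== PORT B =====
-- port of Source B; '.index' of the single characters '[' / ']' is List.idxOf on the chars
-- (exact: first occurrence, guarded by membership), string slices are PySem.List.slice
-- on the chars, string '+' is list append under String.ofList.
def extraireDate_alt (string : String) : String :=
  let l := string.toList
  if '[' ∈ l then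
    let start := l.idxOf '['
    let end_ := if ']' ∈ l then l.idxOf ']' else l.length
    if end_ < start then " "
    else
      let content := PySem.List.slice l (some ((start : Int) + 1)) (some (end_ : Int))
      let spaces := ((PySem.List.enumerate content 0).filter (fun p => p.2 = ' ')).map (·.1)
                      ++ List.replicate 5 (content.length : Int)
      let date := PySem.List.slice content (some (PySem.List.pyGetD spaces 0 0))
                                           (some (PySem.List.pyGetD spaces 2 0))
      let annee := PySem.List.slice content (some (PySem.List.pyGetD spaces 4 0)) none
      String.ofList (annee ++ ' ' :: date)
  else " "

-- ===== PRECONDITION & SPEC =====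
def Spec_extraireDate (string : String) (out : String) : Prop := out = extraireDate_alt string
instance (string : String) (out : String) : Decidable (Spec_extraireDate string out) := by unfold Spec_extraireDate; infer_instance

-- ===== CLAIM (what is proved, stated in full; the proofs are below) =====
def Claim_equal_extraireDate : Prop := ∀ (string : String), Dom_extraireDate string → Spec_extraireDate string (extraireDate string)

-- ===== LEMMAS AND PROOFS =====

-- positions of ' ' in a char list
def spacePos : List Char → List Nat
  | [] => []
  | c :: t => if c = ' ' then 0 :: (spacePos t).map (· + 1) else (spacePos t).map (· + 1)

-- position of the (j+1)-th space, defaulting to the length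
def nthE (m : List Char) (j : Nat) : Nat := ((spacePos m)[j]?).getD m.length

-- pure (accumulator-free) versions of what A's loop appends once start_date is true
def pureD : List Char → Nat → List Char
  | [], _ => []
  | c :: t, cs =>
    let cs' := if c = ' ' then cs + 1 else cs
    (if 0 < cs' ∧ cs' < 3 then [c] else []) ++ pureD t cs'

def pureA : List Char → Nat → List Char
  | [], _ => []
  | c :: t, cs =>
    let cs' := if c = ' ' then cs + 1 else cs
    (if 4 < cs' then [c] else []) ++ pureA t cs'

theorem loop_true (l : List Char) : ∀ (d a : List Char) (cs : Nat),
    extraireDateLoop l true d a cs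
      = (d ++ pureD (l.takeWhile (· ≠ ']')) cs, a ++ pureA (l.takeWhile (· ≠ ']')) cs) := by
  induction l with
  | nil => intro d a cs; simp [extraireDateLoop, pureD, pureA]
  | cons c t ih =>
    intro d a cs
    by_cases hc : c = ']'
    · subst hc; simp [extraireDateLoop, pureD, pureA]
    · simp [extraireDateLoop, List.takeWhile, hc, pureD, pureA, ih]
      constructor <;> (split_ifs <;> simp)

theorem pureD_ge3 (m : List Char) : ∀ cs, 3 ≤ cs → pureD m cs = [] := by
  induction m with
  | nil => intro cs _; simp [pureD]
  | cons c t ih =>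
    intro cs h
    unfold pureD
    by_cases hc : c = ' '
    · simp [hc, ih (cs + 1) (by omega), show ¬ (cs + 1 < 3) by omega]
    · simp [hc, ih cs h, show ¬ (cs < 3) by omega]

theorem nthE_cons_nonspace (c : Char) (t : List Char) (j : Nat) (hc : c ≠ ' ') :
    nthE (c :: t) j = nthE t j + 1 := by
  cases h : (spacePos t)[j]? <;>
    simp [nthE, spacePos, hc, h, List.getElem?_map]

theorem nthE_cons_space_zero (t : List Char) : nthE (' ' :: t) 0 = 0 := by
  simp [nthE, spacePos]

theorem nthE_cons_space (t : List Char) (j : Nat) :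
    nthE (' ' :: t) (j + 1) = nthE t j + 1 := by
  cases h : (spacePos t)[j]? <;>
    simp [nthE, spacePos, h, List.getElem?_map]

theorem pureD_mid (m : List Char) : ∀ cs, 1 ≤ cs → cs ≤ 2 → pureD m cs = m.take (nthE m (2 - cs)) := by
  induction m with
  | nil => intro cs _ _; simp [pureD]
  | cons c t ih =>
    intro cs h1 h2
    by_cases hc : c = ' '
    · subst hc
      interval_cases cs
      · simp [pureD, nthE_cons_space, ih 2 (by omega) le_rfl]
      · simp [pureD, nthE_cons_space_zero, pureD_ge3 t 3 le_rfl]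
    · have h3 : 1 ≤ cs ∧ cs ≤ 2 := ⟨h1, h2⟩
      simp [pureD, hc, nthE_cons_nonspace c t _ hc, ih cs h1 h2, show 0 < cs by omega,
        show cs < 3 by omega]

theorem pureD_zero (m : List Char) : pureD m 0 = (m.take (nthE m 2)).drop (nthE m 0) := by
  induction m with
  | nil => simp [pureD]
  | cons c t ih =>
    by_cases hc : c = ' '
    · subst hc
      simp [pureD, nthE_cons_space, nthE_cons_space_zero, pureD_mid t 1 le_rfl (by omega)]
    · simp [pureD, hc, nthE_cons_nonspace c t _ hc, ih]

theorem pureA_ge5 (m : List Char) : ∀ cs, 5 ≤ cs → pureA m cs = m := by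
  induction m with
  | nil => intro cs _; simp [pureA]
  | cons c t ih =>
    intro cs h
    unfold pureA
    by_cases hc : c = ' '
    · simp [hc, ih (cs + 1) (by omega), show 4 < cs + 1 by omega]
    · simp [hc, ih cs h, show 4 < cs by omega]

theorem pureA_le4 (m : List Char) : ∀ cs, cs ≤ 4 → pureA m cs = m.drop (nthE m (4 - cs)) := by
  induction m with
  | nil => intro cs _; simp [pureA]
  | cons c t ih =>
    intro cs h
    by_cases hc : c = ' '
    · subst hc
      by_cases h4 : cs = 4
      · subst h4
        simp [pureA, nthE_cons_space_zero, pureA_ge5 t 5 le_rfl]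
      · have : 4 - cs = (3 - cs) + 1 := by omega
        rw [this] at *
        simp [pureA, nthE_cons_space, ih (cs + 1) (by omega), show ¬ 4 < cs + 1 by omega,
          show 4 - (cs + 1) = 3 - cs by omega]
    · simp [pureA, hc, nthE_cons_nonspace c t _ hc, ih cs h, show ¬ 4 < cs by omega]

-- bridge: the space-position comprehension is spacePos
theorem enum_filter_spaces (m : List Char) : ∀ (s : Int),
    ((PySem.List.enumerate m s).filter (fun p => p.2 = ' ')).map (·.1)
      = (spacePos m).map (fun k : Nat => s + (k : Int)) := by
  induction m with
  | nil => intro s; simp [PySem.List.enumerate_nil, spacePos]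
  | cons c t ih =>
    intro s
    rw [PySem.List.enumerate_cons]
    by_cases hc : c = ' '
    · subst hc
      rw [List.filter_cons_of_pos (by simp), List.map_cons, ih (s + 1)]
      simp only [spacePos, reduceIte, List.map_cons, List.map_map, Nat.cast_zero, add_zero]
      refine congrArg (s :: ·) ?_
      exact List.map_congr_left (fun k _ => by simp [Function.comp]; ring)
    · rw [List.filter_cons_of_neg (by simp [hc]), ih (s + 1)]
      simp only [spacePos, if_neg hc, List.map_map]
      exact List.map_congr_left (fun k _ => by simp [Function.comp]; ring)

theorem padded_get (m : List Char) (j : Nat) (hj : j < 5) :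
    PySem.List.pyGetD ((spacePos m).map (fun k : Nat => (k : Int)) ++ List.replicate 5 (m.length : Int)) (j : Int) 0
      = (nthE m j : Int) := by
  rw [PySem.List.pyGetD_natCast]
  by_cases h : j < (spacePos m).length
  · rw [List.getD_eq_getElem?_getD, List.getElem?_append_left (by simpa using h)]
    simp [nthE, List.getElem?_map, List.getElem?_eq_getElem (by simpa using h : j < (spacePos m).length)]
  · have h2 : j - ((spacePos m).map (fun k => ((k : Nat) : Int))).length < 5 := by
      simp; omega
    rw [List.getD_eq_getElem?_getD, List.getElem?_append_right (by simpa using h)]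
    simp only [List.getElem?_replicate, if_pos h2, Option.getD_some]
    simp [nthE, List.getElem?_eq_none_iff.mpr (by omega : (spacePos m).length ≤ j)]

theorem takeWhile_ne_eq_take_idxOf (l : List Char) (a : Char) :
    l.takeWhile (· ≠ a) = l.take (l.idxOf a) := by
  induction l with
  | nil => simp
  | cons c t ih =>
    by_cases hc : c = a
    · subst hc; simp [List.takeWhile]
    · rw [List.takeWhile_cons, List.idxOf_cons]
      simp [hc, Bool.cond_eq_ite, beq_iff_eq, decide_not] at ih ⊢
      simp [ih]

def aList (l : List Char) : List Char × List Char := extraireDateLoop l false [] [] 0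

def bRest (content : List Char) : List Char × List Char :=
  let spaces := ((PySem.List.enumerate content 0).filter (fun p => p.2 = ' ')).map (·.1)
                  ++ List.replicate 5 (content.length : Int)
  (PySem.List.slice content (some (PySem.List.pyGetD spaces 0 0)) (some (PySem.List.pyGetD spaces 2 0)),
   PySem.List.slice content (some (PySem.List.pyGetD spaces 4 0)) none)

def bList (l : List Char) : List Char × List Char :=
  if '[' ∈ l then
    if (if ']' ∈ l then l.idxOf ']' else l.length) < l.idxOf '[' then ([], [])
    else
      bRest (PySem.List.slice l (some ((l.idxOf '[' : Int) + 1))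
        (some (((if ']' ∈ l then l.idxOf ']' else l.length : Nat) : Int))))
  else ([], [])

theorem idxOf_cons_ne {c a : Char} (t : List Char) (hc : c ≠ a) :
    (c :: t).idxOf a = t.idxOf a + 1 := by
  simp [hc]

theorem alt_eq (s : String) :
    extraireDate_alt s = String.ofList ((bList s.toList).2 ++ ' ' :: (bList s.toList).1) := by
  unfold extraireDate_alt bList bRest
  by_cases h1 : '[' ∈ s.toList <;> simp only [h1, if_true, if_false]
  · by_cases h2 : (if ']' ∈ s.toList then List.idxOf ']' s.toList else s.toList.length)
        < List.idxOf '[' s.toList <;> simp only [h2, if_true, if_false] <;> rfl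
  · rfl

theorem a_eq (s : String) :
    extraireDate s = String.ofList ((aList s.toList).2 ++ ' ' :: (aList s.toList).1) := rfl

theorem bRest_eq (m : List Char) :
    bRest m = ((m.take (nthE m 2)).drop (nthE m 0), m.drop (nthE m 4)) := by
  unfold bRest
  have hsp : ((PySem.List.enumerate m (0 : Int)).filter (fun p => p.2 = ' ')).map (·.1)
      = (spacePos m).map (fun k : Nat => (k : Int)) := by
    rw [enum_filter_spaces m 0]
    exact List.map_congr_left (fun k _ => by ring)
  rw [hsp]
  have h0 := padded_get m 0 (by omega)
  have h2 := padded_get m 2 (by omega)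
  have h4 := padded_get m 4 (by omega)
  simp only [Nat.cast_ofNat, Nat.cast_zero] at h0 h2 h4
  simp only [h0, h2, h4, PySem.List.slice_natCast, PySem.List.slice_from_natCast]
  simp [List.drop_take]

theorem bList_open (t : List Char) :
    bList ('[' :: t) = bRest (t.takeWhile (· ≠ ']')) := by
  have hmem : '[' ∈ ('[' :: t) := List.mem_cons_self
  unfold bList
  rw [if_pos hmem, List.idxOf_cons_self]
  by_cases hr : ']' ∈ t
  · have hmc : ']' ∈ ('[' :: t) := List.mem_cons_of_mem _ hr
    rw [if_pos hmc, idxOf_cons_ne t (by decide), if_neg (by omega)]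
    congr 1
    have h1 : ((0 : Nat) : Int) + 1 = ((1 : Nat) : Int) := by norm_num
    rw [h1, PySem.List.slice_natCast, takeWhile_ne_eq_take_idxOf]
    simp
  · have hmc : ']' ∉ ('[' :: t) := by simp [hr]
    rw [if_neg hmc, if_neg (by omega)]
    congr 1
    have h1 : ((0 : Nat) : Int) + 1 = ((1 : Nat) : Int) := by norm_num
    rw [h1, PySem.List.slice_natCast, takeWhile_ne_eq_take_idxOf,
      List.idxOf_eq_length_iff.mpr hr]
    simp

theorem bList_shift (c : Char) (t : List Char) (hbr : c ≠ ']') (hlb : c ≠ '[') :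
    bList (c :: t) = bList t := by
  by_cases hm : '[' ∈ t
  · have hmc : '[' ∈ (c :: t) := List.mem_cons_of_mem _ hm
    have hs : (c :: t).idxOf '[' = t.idxOf '[' + 1 := idxOf_cons_ne t hlb
    have he : (if ']' ∈ (c :: t) then (c :: t).idxOf ']' else (c :: t).length)
        = (if ']' ∈ t then t.idxOf ']' else t.length) + 1 := by
      by_cases hr : ']' ∈ t
      · have hrc : ']' ∈ (c :: t) := List.mem_cons_of_mem _ hr
        rw [if_pos hrc, if_pos hr, idxOf_cons_ne t hbr]
      · have hrc : ']' ∉ (c :: t) := by simp [hr, Ne.symm hbr]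
        rw [if_neg hrc, if_neg hr, List.length_cons]
    unfold bList
    rw [if_pos hmc, if_pos hm, hs, he]
    by_cases hlt : (if ']' ∈ t then t.idxOf ']' else t.length) < t.idxOf '['
    · rw [if_pos (by omega), if_pos hlt]
    · rw [if_neg (by omega), if_neg hlt]
      congr 1
      have h2 : ((t.idxOf '[' + 1 : Nat) : Int) + 1 = ((t.idxOf '[' + 2 : Nat) : Int) := by
        push_cast; ring
      have h3 : ((t.idxOf '[' : Nat) : Int) + 1 = ((t.idxOf '[' + 1 : Nat) : Int) := by
        push_cast; ring
      rw [h2, h3, PySem.List.slice_natCast, PySem.List.slice_natCast]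
      have h4 : (if ']' ∈ t then t.idxOf ']' else t.length) + 1 - (t.idxOf '[' + 2)
          = (if ']' ∈ t then t.idxOf ']' else t.length) - (t.idxOf '[' + 1) := by omega
      rw [h4]
      congr 1
  · have hmc : '[' ∉ (c :: t) := by simp [hm, Ne.symm hlb]
    rw [bList, bList, if_neg hmc, if_neg hm]

theorem main_pair (l : List Char) : aList l = bList l := by
  induction l with
  | nil => simp [aList, bList, extraireDateLoop]
  | cons c t ih =>
    by_cases hbr : c = ']'
    · subst hbr
      have ha : aList (']' :: t) = ([], []) := by simp [aList, extraireDateLoop]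
      rw [ha]
      by_cases hm : '[' ∈ t
      · have hmc : '[' ∈ (']' :: t) := List.mem_cons_of_mem _ hm
        have hrc : ']' ∈ (']' :: t) := List.mem_cons_self
        rw [bList, if_pos hmc, if_pos hrc, List.idxOf_cons_self,
          idxOf_cons_ne t (by decide), if_pos (by omega)]
      · have hmc : '[' ∉ (']' :: t) := by simp [hm]
        rw [bList, if_neg hmc]
    · by_cases hlb : c = '['
      · subst hlb
        have ha : aList ('[' :: t) = extraireDateLoop t true [] [] 0 := by
          simp [aList, extraireDateLoop]
        rw [ha, loop_true, List.nil_append, List.nil_append, pureD_zero,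
          pureA_le4 _ 0 (by omega), bList_open, bRest_eq]
      · have ha : aList (c :: t) = aList t := by
          simp [aList, extraireDateLoop, hbr, hlb]
        rw [ha, ih, bList_shift c t hbr hlb]

theorem main_list (l : List Char) :
    extraireDate (String.ofList l) = extraireDate_alt (String.ofList l) := by
  rw [a_eq, alt_eq, main_pair]

-- ===== VERDICT (by name: the statement is the Claim_ definition above) =====
theorem extraireDate_spec : Claim_equal_extraireDate := by
  intro s _
  unfold Spec_extraireDate
  have h := main_list s.toList
  simpa using h
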